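-- pv_equiv track=rewrite | github.com/mani319/DSA | matrix/create_alternate_X_O_rectangles.py | createAlternateXO
-- ===== SOURCE A (Python) =====
-- def createAlternateXO(m, n):
--     mat = []
--     for i in range(m):
--         mat += [[0]*n]
--
--     r, c = 0, 0
--     char = 'X'
--     while(r < m and c < n):
--         for i in range(c, n):
--             mat[r][i] = char
--         r += 1
--
--         for i in range(r, m):
--             mat[i][n-1] = char
--         n -= 1
--
--         if(r < m):
--             for i in range(n-1, c-1, -1):
--                 mat[m-1][i] = char
--             m -= 1
--
--         if(c < n):
--             for i in range(m-1, r-1, -1):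
--                 mat[i][c] = char
--             c += 1
--
--         if(char == 'X'):
--             char = 'O'
--         else:
--             char = 'X'
--
--     return mat
-- ===== SOURCE B (Python) =====
-- def createAlternateXO(m, n):
--     return [['X' if min(i, j, m - 1 - i, n - 1 - j) % 2 == 0 else 'O'
--              for j in range(n)]
--             for i in range(m)]
-- ===== Notes on version B (the rewrite author's own statement) =====
-- stated objective: simpler
-- what changed: Replaces the four boundary-walking write passes per shrinking ring (mutating a preallocated matrix) with a direct per-cell closed formula: the ring index of cell (i,j) is min(i, j, m-1-i, n-1-j) and even rings are 'X', odd are 'O'.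
import Mathlib
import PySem

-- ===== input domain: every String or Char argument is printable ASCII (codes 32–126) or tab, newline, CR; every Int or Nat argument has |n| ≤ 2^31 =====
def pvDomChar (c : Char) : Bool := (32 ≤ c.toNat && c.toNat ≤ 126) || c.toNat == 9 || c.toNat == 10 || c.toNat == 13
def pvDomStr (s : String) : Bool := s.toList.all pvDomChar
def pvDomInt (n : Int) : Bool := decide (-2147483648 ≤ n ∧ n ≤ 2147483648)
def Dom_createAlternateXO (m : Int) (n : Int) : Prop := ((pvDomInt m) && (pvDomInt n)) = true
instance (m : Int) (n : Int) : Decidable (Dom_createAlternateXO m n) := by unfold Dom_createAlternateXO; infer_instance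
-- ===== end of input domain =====

-- B replaces A's four boundary-walking write passes per shrinking ring with a direct
-- per-cell formula (ring index = min(i, j, m-1-i, n-1-j); even ring → "X"): simpler, same cost.

-- ===== PORT A =====
-- mat[r][i] = v.  Every index A writes is nonnegative and in range (r < len(mat),
-- i < len(row)), so Nat-indexed List.set is exact for Python's mat[r][i] = v here.
def pvSetCell (mat : List (List String)) (r i : Int) (v : String) : List (List String) :=
  mat.set r.toNat ((mat.getD r.toNat []).set i.toNat v)

-- termination measure fact for pvLoopA's while loop (cited by its decreasing_by)
theorem pvLoopA_dec (r c m n : Int) (h : r < m ∧ c < n) :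
    ((if r + 1 < m then m - 1 else m) - (r + 1) +
      (n - 1 - (if c < n - 1 then c + 1 else c))).toNat < (m - r + (n - c)).toNat := by
  refine (Int.toNat_lt_toNat (by linarith [h.1, h.2])).mpr ?_
  split <;> split <;> linarith [h.1, h.2]

-- the while loop of A, with its mutable state (mat, r, c, m, n, char) as arguments
def pvLoopA (mat : List (List String)) (r c m n : Int) (ch : String) : List (List String) :=
  if hrc : r < m ∧ c < n then
    -- for i in range(c, n): mat[r][i] = char ; r += 1
    let mat1 := (PySem.List.pyRange c n 1).foldl (fun a i => pvSetCell a r i ch) mat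
    -- for i in range(r, m): mat[i][n-1] = char ; n -= 1
    let mat2 := (PySem.List.pyRange (r+1) m 1).foldl (fun a i => pvSetCell a i (n-1) ch) mat1
    -- if r < m: for i in range(n-1, c-1, -1): mat[m-1][i] = char ; m -= 1
    let mat3 :=
      if r + 1 < m then
        (PySem.List.pyRange (n-1-1) (c-1) (-1)).foldl (fun a i => pvSetCell a (m-1) i ch) mat2
      else mat2
    let m2 := if r + 1 < m then m - 1 else m
    -- if c < n: for i in range(m-1, r-1, -1): mat[i][c] = char ; c += 1
    let mat4 :=
      if c < n - 1 then
        (PySem.List.pyRange (m2 - 1) (r+1-1) (-1)).foldl (fun a i => pvSetCell a i c ch) mat3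
      else mat3
    let c2 := if c < n - 1 then c + 1 else c
    pvLoopA mat4 (r+1) c2 m2 (n-1) (if ch = "X" then "O" else "X")
  else mat
termination_by (m - r + (n - c)).toNat
decreasing_by
  exact pvLoopA_dec r c m n hrc

-- int 0, the placeholder of the initial rows ([0]*n), is represented as the string "0";
-- it is always overwritten before A returns (proved: outside the loop's reach only when
-- the cell does not exist).
def createAlternateXO (m : Int) (n : Int) : List (List String) :=
  let mat := (PySem.List.pyRange 0 m 1).foldl
    (fun acc _ => acc ++ [PySem.List.pyRepeat ["0"] n]) []
  pvLoopA mat 0 0 m n "X"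

-- ===== PORT B =====
def createAlternateXO_alt (m : Int) (n : Int) : List (List String) :=
  (PySem.List.pyRange 0 m 1).map (fun i =>
    (PySem.List.pyRange 0 n 1).map (fun j =>
      if PySem.Int.mod (min (min i j) (min (m - 1 - i) (n - 1 - j))) 2 = 0 then "X" else "O"))

-- ===== PRECONDITION & SPEC =====
def Spec_createAlternateXO (m : Int) (n : Int) (out : List (List String)) : Prop := out = createAlternateXO_alt m n
instance (m : Int) (n : Int) (out : List (List String)) : Decidable (Spec_createAlternateXO m n out) := by unfold Spec_createAlternateXO; infer_instance

-- ===== CLAIM (what is proved, stated in full; the proofs are below) =====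
def Claim_equal_createAlternateXO : Prop := ∀ (m : Int) (n : Int), Dom_createAlternateXO m n → Spec_createAlternateXO m n (createAlternateXO m n)

-- ===== LEMMAS AND PROOFS =====

-- cell (a, b) of the matrix, as an Option
def pvGet2 (mat : List (List String)) (a b : Nat) : Option String :=
  mat[a]?.bind (fun row => row[b]?)

-- shape invariant: M rows, each of length N
def pvShape (mat : List (List String)) (M N : Nat) : Prop :=
  mat.length = M ∧ ∀ row ∈ mat, row.length = N

-- the colour A paints on ring d when the outermost ring's colour is ch
def pvColor (ch : String) (d : Int) : String :=
  if PySem.Int.mod d 2 = 0 then ch else (if ch = "X" then "O" else "X")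

theorem pvShape_setCell {mat : List (List String)} {M N : Nat} (h : pvShape mat M N)
    (r i : Int) (v : String) : pvShape (pvSetCell mat r i v) M N := by
  obtain ⟨hl, hrow⟩ := h
  unfold pvSetCell
  refine ⟨by simpa using hl, fun row hm => ?_⟩
  by_cases hR : r.toNat < mat.length
  · rcases List.mem_or_eq_of_mem_set hm with h1 | h1
    · exact hrow row h1
    · subst h1
      rw [List.getD_eq_getElem mat [] hR, List.length_set]
      exact hrow _ (List.getElem_mem hR)
  · rw [List.set_eq_of_length_le (by omega)] at hm
    exact hrow row hm

theorem pvGet2_setCell {mat : List (List String)} {M N : Nat} (h : pvShape mat M N) {r i : Int}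
    (hr : 0 ≤ r) (hrM : r.toNat < M) (hi : 0 ≤ i) (hiN : i.toNat < N) (v : String) (a b : Nat) :
    pvGet2 (pvSetCell mat r i v) a b =
      if a = r.toNat ∧ b = i.toNat then some v else pvGet2 mat a b := by
  obtain ⟨hl, hrow⟩ := h
  subst hl
  have hrow' : (mat[r.toNat]'hrM).length = N := hrow _ (List.getElem_mem hrM)
  have hsome : mat[r.toNat]? = some (mat[r.toNat]'hrM) := List.getElem?_eq_getElem hrM
  unfold pvSetCell pvGet2
  rw [List.getD_eq_getElem mat [] hrM]
  by_cases hac : a = r.toNat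
  · subst hac
    rw [List.getElem?_set_self (by omega)]
    by_cases hbc : b = i.toNat
    · subst hbc
      rw [Option.bind_some _ _, List.getElem?_set_self (by rw [hrow']; exact hiN)]
      simp
    · rw [Option.bind_some _ _, List.getElem?_set_ne (by omega)]
      simp [hsome, hbc]
  · rw [List.getElem?_set_ne (by omega)]
    simp [hac]

-- writing value v along row r, columns ks
theorem pvRowFold {mat M N} (h : pvShape mat M N) {r : Int} (hr : 0 ≤ r) (hrM : r.toNat < M)
    (ks : List Int) (hk : ∀ k ∈ ks, 0 ≤ k ∧ k.toNat < N) (v : String) :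
    pvShape (ks.foldl (fun a i => pvSetCell a r i v) mat) M N ∧
    ∀ a b, pvGet2 (ks.foldl (fun a i => pvSetCell a r i v) mat) a b =
      if a = r.toNat ∧ (∃ k ∈ ks, b = k.toNat) then some v else pvGet2 mat a b := by
  induction ks generalizing mat with
  | nil => simpa using h
  | cons k ks ih =>
    have hk0 := hk k (List.mem_cons_self)
    have hk' : ∀ k' ∈ ks, 0 ≤ k' ∧ k'.toNat < N := fun k' hm => hk k' (List.mem_cons_of_mem _ hm)
    obtain ⟨hs, hg⟩ := ih (pvShape_setCell h r k v) hk'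
    refine ⟨hs, fun a b => ?_⟩
    rw [List.foldl_cons]
    rw [hg a b, pvGet2_setCell h hr hrM hk0.1 hk0.2 v a b]
    by_cases hac : a = r.toNat
    · by_cases hb : b = k.toNat
      · simp [hac, hb]
      · by_cases hbs : ∃ k' ∈ ks, b = k'.toNat <;> simp [hac, hb, hbs]
    · simp [hac]

-- writing value v along column c, rows ks
theorem pvColFold {mat M N} (h : pvShape mat M N) {c : Int} (hc : 0 ≤ c) (hcN : c.toNat < N)
    (ks : List Int) (hk : ∀ k ∈ ks, 0 ≤ k ∧ k.toNat < M) (v : String) :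
    pvShape (ks.foldl (fun a i => pvSetCell a i c v) mat) M N ∧
    ∀ a b, pvGet2 (ks.foldl (fun a i => pvSetCell a i c v) mat) a b =
      if b = c.toNat ∧ (∃ k ∈ ks, a = k.toNat) then some v else pvGet2 mat a b := by
  induction ks generalizing mat with
  | nil => simpa using h
  | cons k ks ih =>
    have hk0 := hk k (List.mem_cons_self)
    have hk' : ∀ k' ∈ ks, 0 ≤ k' ∧ k'.toNat < M := fun k' hm => hk k' (List.mem_cons_of_mem _ hm)
    obtain ⟨hs, hg⟩ := ih (pvShape_setCell h k c v) hk'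
    refine ⟨hs, fun a b => ?_⟩
    rw [List.foldl_cons]
    rw [hg a b, pvGet2_setCell h hk0.1 hk0.2 hc hcN v a b]
    by_cases hbc : b = c.toNat
    · by_cases ha : a = k.toNat
      · simp [hbc, ha]
      · by_cases has : ∃ k' ∈ ks, a = k'.toNat <;> simp [hbc, ha, has]
    · simp [hbc]

-- ring index of an interior cell of the one-step-smaller window, as a plain min identity
theorem pvMin4_pred (x1 x2 x3 x4 : Int) :
    min (min (x1 - 1) (x2 - 1)) (min (x3 - 1) (x4 - 1)) = min (min x1 x2) (min x3 x4) - 1 := by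
  rw [min_sub_sub_right, min_sub_sub_right, min_sub_sub_right]

-- a border cell of the window has ring index 0
theorem pvWin_min_zero {r c m n : Int} {a b : Nat}
    (hw : r ≤ (a : Int) ∧ (a : Int) < m ∧ c ≤ (b : Int) ∧ (b : Int) < n)
    (h0 : (a : Int) = r ∨ (a : Int) = m - 1 ∨ (b : Int) = c ∨ (b : Int) = n - 1) :
    min (min ((a : Int) - r) ((b : Int) - c)) (min (m - 1 - (a : Int)) (n - 1 - (b : Int))) = 0 := by
  obtain ⟨h1, h2, h3, h4⟩ := hw
  apply le_antisymm
  · rcases h0 with h | h | h | h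
    · exact le_trans (min_le_left _ _) (le_trans (min_le_left _ _) (by omega))
    · exact le_trans (min_le_right _ _) (le_trans (min_le_left _ _) (by omega))
    · exact le_trans (min_le_left _ _) (le_trans (min_le_right _ _) (by omega))
    · exact le_trans (min_le_right _ _) (le_trans (min_le_right _ _) (by omega))
  · exact le_min (le_min (by omega) (by omega)) (le_min (by omega) (by omega))

-- the main loop invariant: pvLoopA paints exactly the window [r,m) × [c,n), the cell (a,b)
-- with the colour of its ring min(a-r, b-c, m-1-a, n-1-b)
theorem pvExists_pyRange_one {c n : Int} (hc : 0 ≤ c) (x : Nat) :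
    (∃ k ∈ PySem.List.pyRange c n 1, x = k.toNat) ↔ (c ≤ (x : Int) ∧ (x : Int) < n) := by
  constructor
  · rintro ⟨k, hk, rfl⟩
    rw [PySem.List.mem_pyRange_one] at hk
    omega
  · intro hx
    exact ⟨(x : Int), PySem.List.mem_pyRange_one.mpr (by omega), by omega⟩

theorem pvExists_pyRange_neg_one {a b : Int} (hb : 0 ≤ b + 1) (x : Nat) :
    (∃ k ∈ PySem.List.pyRange a b (-1), x = k.toNat) ↔ (b < (x : Int) ∧ (x : Int) ≤ a) := by
  constructor
  · rintro ⟨k, hk, rfl⟩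
    rw [PySem.List.mem_pyRange_neg_one] at hk
    omega
  · intro hx
    exact ⟨(x : Int), PySem.List.mem_pyRange_neg_one.mpr (by omega), by omega⟩

theorem pvColor_zero (ch : String) : pvColor ch 0 = ch := by
  simp [pvColor]

theorem pvColor_pred {ch : String} (hch : ch = "X" ∨ ch = "O") {d : Int} (hd : 1 ≤ d) :
    pvColor (if ch = "X" then "O" else "X") (d - 1) = pvColor ch d := by
  have h1 : PySem.Int.mod (d - 1) 2 = (d - 1) % 2 := PySem.Int.mod_eq_emod_of_pos (by norm_num)
  have h2 : PySem.Int.mod d 2 = d % 2 := PySem.Int.mod_eq_emod_of_pos (by norm_num)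
  by_cases hp : d % 2 = 0
  · have hp' : (d - 1) % 2 = 1 := by omega
    rcases hch with rfl | rfl <;> simp [pvColor, h1, h2, hp, hp']
  · have hp0 : d % 2 = 1 := by omega
    have hp' : (d - 1) % 2 = 0 := by omega
    rcases hch with rfl | rfl <;> simp [pvColor, h1, h2, hp0, hp']

theorem pvLoopA_spec : ∀ (t : Nat) (mat : List (List String)) (r c m n : Int) (ch : String)
    (M N : Nat), (m - r + (n - c)).toNat ≤ t →
    pvShape mat M N → (ch = "X" ∨ ch = "O") →
    0 ≤ r → 0 ≤ c → m ≤ (M : Int) → n ≤ (N : Int) →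
    pvShape (pvLoopA mat r c m n ch) M N ∧
    ∀ a b : Nat, pvGet2 (pvLoopA mat r c m n ch) a b =
      if r ≤ (a : Int) ∧ (a : Int) < m ∧ c ≤ (b : Int) ∧ (b : Int) < n then
        some (pvColor ch (min (min ((a : Int) - r) ((b : Int) - c)) (min (m - 1 - a) (n - 1 - b))))
      else pvGet2 mat a b := by
  intro t
  induction t with
  | zero =>
    intro mat r c m n ch M N ht hs hch hr hc hm hn
    rw [pvLoopA, dif_neg (by omega)]
    exact ⟨hs, fun a b => by rw [if_neg (by omega)]⟩
  | succ t IH =>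
    intro mat r c m n ch M N ht hs hch hr hc hm hn
    by_cases hrc : r < m ∧ c < n
    case neg =>
      rw [pvLoopA, dif_neg hrc]
      exact ⟨hs, fun a b => by rw [if_neg (by omega)]⟩
    case pos =>
    obtain ⟨hrm, hcn⟩ := hrc
    rw [pvLoopA, dif_pos ⟨hrm, hcn⟩]
    dsimp only
    obtain ⟨hs1, hg1⟩ := pvRowFold hs hr (by omega) (PySem.List.pyRange c n 1)
      (fun k hk => by rw [PySem.List.mem_pyRange_one] at hk; omega) ch
    obtain ⟨hs2, hg2⟩ := pvColFold hs1 (show (0:Int) ≤ n - 1 by omega) (by omega)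
      (PySem.List.pyRange (r + 1) m 1)
      (fun k hk => by rw [PySem.List.mem_pyRange_one] at hk; omega) ch
    by_cases hb : r + 1 < m
    · by_cases hl : c < n - 1
      · -- full ring: bottom row and left column are both written
        simp only [hb, hl, ite_true]
        obtain ⟨hs3, hg3⟩ := pvRowFold hs2 (show (0:Int) ≤ m - 1 by omega) (by omega)
          (PySem.List.pyRange (n - 1 - 1) (c - 1) (-1))
          (fun k hk => by rw [PySem.List.mem_pyRange_neg_one] at hk; omega) ch
        obtain ⟨hs4, hg4⟩ := pvColFold hs3 hc (by omega)
          (PySem.List.pyRange (m - 1 - 1) (r + 1 - 1) (-1))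
          (fun k hk => by rw [PySem.List.mem_pyRange_neg_one] at hk; omega) ch
        obtain ⟨hsR, hgR⟩ := IH _ (r + 1) (c + 1) (m - 1) (n - 1)
          (if ch = "X" then "O" else "X") M N (by omega) hs4
          (by rcases hch with rfl | rfl <;> simp) (by omega) (by omega) (by omega) (by omega)
        refine ⟨hsR, fun a b => ?_⟩
        rw [hgR a b]
        simp only [pvExists_pyRange_one hc, pvExists_pyRange_one (show (0:Int) ≤ r + 1 by omega),
          pvExists_pyRange_neg_one (show (0:Int) ≤ c - 1 + 1 by omega),
          pvExists_pyRange_neg_one (show (0:Int) ≤ r + 1 - 1 + 1 by omega)] at hg1 hg2 hg3 hg4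
        by_cases hw : r ≤ (a : Int) ∧ (a : Int) < m ∧ c ≤ (b : Int) ∧ (b : Int) < n
        · by_cases hiw : r + 1 ≤ (a : Int) ∧ (a : Int) < m - 1 ∧ c + 1 ≤ (b : Int) ∧ (b : Int) < n - 1
          · rw [if_pos hiw, if_pos hw,
              show ((a : Int) - (r + 1)) = ((a : Int) - r) - 1 from by ring,
              show ((b : Int) - (c + 1)) = ((b : Int) - c) - 1 from by ring,
              show (m - 1 - 1 - (a : Int)) = (m - 1 - (a : Int)) - 1 from by ring,
              show (n - 1 - 1 - (b : Int)) = (n - 1 - (b : Int)) - 1 from by ring,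
              pvMin4_pred,
              pvColor_pred hch (le_min (le_min (by omega) (by omega))
                (le_min (by omega) (by omega)))]
          · rw [if_neg hiw, if_pos hw, hg4 a b, hg3 a b, hg2 a b, hg1 a b,
              pvWin_min_zero hw (by omega), pvColor_zero]
            split_ifs <;> first | rfl | (exfalso; omega)
        · rw [if_neg hw,
            if_neg (show ¬(r + 1 ≤ (a : Int) ∧ (a : Int) < m - 1 ∧ c + 1 ≤ (b : Int) ∧
              (b : Int) < n - 1) from by omega), hg4 a b, hg3 a b, hg2 a b, hg1 a b]
          split_ifs <;> first | rfl | (exfalso; omega)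
      · -- single remaining column (c = n - 1): no left-column pass
        simp only [hb, hl, ite_true, ite_false]
        obtain ⟨hs3, hg3⟩ := pvRowFold hs2 (show (0:Int) ≤ m - 1 by omega) (by omega)
          (PySem.List.pyRange (n - 1 - 1) (c - 1) (-1))
          (fun k hk => by rw [PySem.List.mem_pyRange_neg_one] at hk; omega) ch
        obtain ⟨hsR, hgR⟩ := IH _ (r + 1) c (m - 1) (n - 1)
          (if ch = "X" then "O" else "X") M N (by omega) hs3
          (by rcases hch with rfl | rfl <;> simp) (by omega) (by omega) (by omega) (by omega)
        refine ⟨hsR, fun a b => ?_⟩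
        rw [hgR a b]
        simp only [pvExists_pyRange_one hc, pvExists_pyRange_one (show (0:Int) ≤ r + 1 by omega),
          pvExists_pyRange_neg_one (show (0:Int) ≤ c - 1 + 1 by omega)] at hg1 hg2 hg3
        by_cases hw : r ≤ (a : Int) ∧ (a : Int) < m ∧ c ≤ (b : Int) ∧ (b : Int) < n
        · rw [if_pos hw,
            if_neg (show ¬(r + 1 ≤ (a : Int) ∧ (a : Int) < m - 1 ∧ c ≤ (b : Int) ∧
              (b : Int) < n - 1) from by omega), hg3 a b, hg2 a b, hg1 a b,
            pvWin_min_zero hw (by omega), pvColor_zero]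
          split_ifs <;> first | rfl | (exfalso; omega)
        · rw [if_neg hw,
            if_neg (show ¬(r + 1 ≤ (a : Int) ∧ (a : Int) < m - 1 ∧ c ≤ (b : Int) ∧
              (b : Int) < n - 1) from by omega), hg3 a b, hg2 a b, hg1 a b]
          split_ifs <;> first | rfl | (exfalso; omega)
    · by_cases hl : c < n - 1
      · -- single remaining row (r + 1 = m): no bottom pass; left pass is empty
        simp only [hb, hl, ite_true, ite_false]
        obtain ⟨hs4, hg4⟩ := pvColFold hs2 hc (by omega)
          (PySem.List.pyRange (m - 1) (r + 1 - 1) (-1))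
          (fun k hk => by rw [PySem.List.mem_pyRange_neg_one] at hk; omega) ch
        obtain ⟨hsR, hgR⟩ := IH _ (r + 1) (c + 1) m (n - 1)
          (if ch = "X" then "O" else "X") M N (by omega) hs4
          (by rcases hch with rfl | rfl <;> simp) (by omega) (by omega) (by omega) (by omega)
        refine ⟨hsR, fun a b => ?_⟩
        rw [hgR a b]
        simp only [pvExists_pyRange_one hc, pvExists_pyRange_one (show (0:Int) ≤ r + 1 by omega),
          pvExists_pyRange_neg_one (show (0:Int) ≤ r + 1 - 1 + 1 by omega)] at hg1 hg2 hg4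
        by_cases hw : r ≤ (a : Int) ∧ (a : Int) < m ∧ c ≤ (b : Int) ∧ (b : Int) < n
        · rw [if_pos hw,
            if_neg (show ¬(r + 1 ≤ (a : Int) ∧ (a : Int) < m ∧ c + 1 ≤ (b : Int) ∧
              (b : Int) < n - 1) from by omega), hg4 a b, hg2 a b, hg1 a b,
            pvWin_min_zero hw (by omega), pvColor_zero]
          split_ifs <;> first | rfl | (exfalso; omega)
        · rw [if_neg hw,
            if_neg (show ¬(r + 1 ≤ (a : Int) ∧ (a : Int) < m ∧ c + 1 ≤ (b : Int) ∧
              (b : Int) < n - 1) from by omega), hg4 a b, hg2 a b, hg1 a b]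
          split_ifs <;> first | rfl | (exfalso; omega)
      · -- single remaining cell
        simp only [hb, hl, ite_false]
        obtain ⟨hsR, hgR⟩ := IH _ (r + 1) c m (n - 1)
          (if ch = "X" then "O" else "X") M N (by omega) hs2
          (by rcases hch with rfl | rfl <;> simp) (by omega) (by omega) (by omega) (by omega)
        refine ⟨hsR, fun a b => ?_⟩
        rw [hgR a b]
        simp only [pvExists_pyRange_one hc,
          pvExists_pyRange_one (show (0:Int) ≤ r + 1 by omega)] at hg1 hg2
        by_cases hw : r ≤ (a : Int) ∧ (a : Int) < m ∧ c ≤ (b : Int) ∧ (b : Int) < n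
        · rw [if_pos hw,
            if_neg (show ¬(r + 1 ≤ (a : Int) ∧ (a : Int) < m ∧ c ≤ (b : Int) ∧
              (b : Int) < n - 1) from by omega), hg2 a b, hg1 a b,
            pvWin_min_zero hw (by omega), pvColor_zero]
          split_ifs <;> first | rfl | (exfalso; omega)
        · rw [if_neg hw,
            if_neg (show ¬(r + 1 ≤ (a : Int) ∧ (a : Int) < m ∧ c ≤ (b : Int) ∧
              (b : Int) < n - 1) from by omega), hg2 a b, hg1 a b]
          split_ifs <;> first | rfl | (exfalso; omega)

theorem pvEq_of_get2 {mat1 mat2 : List (List String)} (hlen : mat1.length = mat2.length)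
    (h : ∀ a b, pvGet2 mat1 a b = pvGet2 mat2 a b) : mat1 = mat2 := by
  apply List.ext_getElem?
  intro a
  by_cases ha : a < mat1.length
  · have ha2 : a < mat2.length := by omega
    rw [List.getElem?_eq_getElem ha, List.getElem?_eq_getElem ha2]
    congr 1
    apply List.ext_getElem?
    intro b
    have hab := h a b
    unfold pvGet2 at hab
    rwa [List.getElem?_eq_getElem ha, List.getElem?_eq_getElem ha2,
      Option.bind_some _ _, Option.bind_some _ _] at hab
  · rw [List.getElem?_eq_none (by omega), List.getElem?_eq_none (by omega)]

-- ===== VERDICT (by name: the statement is the Claim_ definition above) =====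
theorem createAlternateXO_spec : Claim_equal_createAlternateXO := by
  intro m n _
  unfold Spec_createAlternateXO createAlternateXO createAlternateXO_alt
  rw [PySem.List.foldl_append_singleton_eq_map]
  simp only [List.nil_append, PySem.List.pyRepeat_singleton]
  have hs0 : pvShape ((PySem.List.pyRange 0 m 1).map
      (fun _ => List.replicate n.toNat "0")) m.toNat n.toNat := by
    constructor
    · simp [PySem.List.length_pyRange_one]
    · intro row hm
      simp only [List.mem_map] at hm
      obtain ⟨_, _, rfl⟩ := hm
      simp
  have hg0 : ∀ a b : Nat, pvGet2 ((PySem.List.pyRange 0 m 1).map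
      (fun _ => List.replicate n.toNat "0")) a b =
      if a < m.toNat ∧ b < n.toNat then some "0" else none := by
    intro a b
    by_cases ha : a < m.toNat <;> by_cases hb' : b < n.toNat <;>
      simp [pvGet2, List.getElem?_map, PySem.List.getElem?_pyRange_one, ha, hb',
        List.getElem?_replicate]
  obtain ⟨hsA, hgA⟩ := pvLoopA_spec (m + n).toNat _ 0 0 m n "X" m.toNat n.toNat
    (by omega) hs0 (Or.inl rfl) le_rfl le_rfl (by omega) (by omega)
  apply pvEq_of_get2
  · rw [hsA.1]
    simp [PySem.List.length_pyRange_one]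
  · intro a b
    rw [hgA a b]
    by_cases hab : a < m.toNat ∧ b < n.toNat
    · rw [if_pos (show (0:Int) ≤ (a:Int) ∧ (a:Int) < m ∧ (0:Int) ≤ (b:Int) ∧ (b:Int) < n
        from by omega)]
      simp [pvGet2, pvColor, List.getElem?_map, PySem.List.getElem?_pyRange_one,
        hab.1, hab.2]
    · rw [if_neg (show ¬((0:Int) ≤ (a:Int) ∧ (a:Int) < m ∧ (0:Int) ≤ (b:Int) ∧ (b:Int) < n)
        from by omega), hg0 a b, if_neg hab]
      have : ¬(a < m.toNat ∧ b < n.toNat) := hab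
      by_cases ha : a < m.toNat
      · simp [pvGet2, List.getElem?_map, PySem.List.getElem?_pyRange_one, ha,
          show ¬(b < n.toNat) from by omega]
      · simp [pvGet2, List.getElem?_map, PySem.List.getElem?_pyRange_one, ha]
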